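-- pv_equiv track=rewrite | github.com/carlogeertse/DataMiningProject | secoda.py | calculate_constellation_frequencies
-- ===== SOURCE A (Python) =====
-- def calculate_constellation_frequencies(data):
--     # First we create the constellations
--     constellations = {}
--     constellation_data = []
--     for row in data:
--         constellation = ''
--         for attribute in row:
--             constellation = constellation + '{0}-'.format(attribute)
--         constellation_data.append(constellation)
--         if constellation not in constellations:
--             constellations[constellation] = 0
--         constellations[constellation] = constellations[constellation] + 1
--     constellation_frequencies = []
--     for i in range(0, len(data)):
--         constellation_frequencies.append(constellations[constellation_data[i]])
--     return constellation_frequencies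
-- ===== SOURCE B (Python) =====
-- def calculate_constellation_frequencies(data):
--     keys = [''.join('{0}-'.format(a) for a in row) for row in data]
--     pairs = sorted(zip(keys, range(len(keys))), key=lambda p: p[0])
--     result = [0] * len(keys)
--     while pairs:
--         k = pairs[0][0]
--         j = 1
--         while j < len(pairs) and pairs[j][0] == k:
--             j += 1
--         for _, i in pairs[:j]:
--             result[i] = j
--         pairs = pairs[j:]
--     return result
-- ===== Notes on version B (the rewrite author's own statement) =====
-- stated objective: alternative
-- what changed: Replaces A's dict-counting pass plus index-lookup loop with sort-and-group-by: build (key, original-index) pairs, sort them by key, sweep maximal runs of equal keys and write each run's length back at the stored original indices.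
import Mathlib
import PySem

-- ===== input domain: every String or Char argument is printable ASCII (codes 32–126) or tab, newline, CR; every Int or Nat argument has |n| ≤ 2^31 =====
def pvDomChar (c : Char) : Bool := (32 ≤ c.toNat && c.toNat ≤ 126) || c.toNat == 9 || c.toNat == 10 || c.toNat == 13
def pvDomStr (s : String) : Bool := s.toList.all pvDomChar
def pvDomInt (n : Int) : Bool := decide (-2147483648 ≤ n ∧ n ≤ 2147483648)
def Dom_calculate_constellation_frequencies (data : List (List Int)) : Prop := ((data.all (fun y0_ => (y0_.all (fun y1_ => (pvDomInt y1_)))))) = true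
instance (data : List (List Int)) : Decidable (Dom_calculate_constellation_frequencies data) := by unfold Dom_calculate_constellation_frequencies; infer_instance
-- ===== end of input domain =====

-- B replaces A's dict-counting pass with sort-and-group: it sorts (key, index) pairs by key,
-- sweeps maximal runs of equal keys, and writes each run's length back at the stored original
-- indices — a different algorithm (sort + run sweep vs hash counting), not claimed faster.


-- ===== PORT A =====
-- single loop building the dict of counts and the per-row key list, then an index loop
def calculate_constellation_frequencies (data : List (List Int)) : List Int :=
  let st := data.foldl
    (fun (st : PySem.Dict String Int × List String) row =>
      let constellation := row.foldl
        (fun c attr => c ++ (PySem.Int.toStr attr ++ "-")) ""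
      let constellation_data := st.2 ++ [constellation]
      let constellations :=
        if st.1.contains constellation then st.1 else st.1.insert constellation 0
      (constellations.insert constellation (constellations.getD constellation 0 + 1),
       constellation_data))
    (PySem.Dict.empty, [])
  -- constellations[constellation_data[i]]: the key is always present, so getD is exact
  (PySem.List.pyRange 0 (data.length : Int) 1).map
    (fun i => st.1.getD (PySem.List.pyGetD st.2 i "") 0)

-- ===== PORT B =====
-- Source B's sweep: while pairs: find the run of the head key (inner while = takeWhile on the
-- tail), write the run length at each stored index, continue on pairs[j:] (= dropWhile)
def pvSweep : List (String × Int) → List Int → List Int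
  | [], result => result
  | (k, i) :: rest, result =>
      let run : List (String × Int) := (k, i) :: rest.takeWhile (fun p => p.1 == k)
      let result' := run.foldl (fun r p => PySem.List.pySetD r p.2 (run.length : Int)) result
      pvSweep (rest.dropWhile (fun p => p.1 == k)) result'
termination_by pairs _ => pairs.length
decreasing_by
  simp only [List.length_cons]
  exact Nat.lt_succ_of_le (List.length_dropWhile_le _ _)

def calculate_constellation_frequencies_alt (data : List (List Int)) : List Int :=
  let keys := data.map
    (fun row => PySem.Str.join "" (row.map (fun a => PySem.Int.toStr a ++ "-")))
  let pairs := PySem.List.sorted (keys.zip (PySem.List.pyRange 0 (keys.length : Int) 1)) Prod.fst false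
  pvSweep pairs (List.replicate keys.length 0)

-- ===== PRECONDITION & SPEC =====
def Spec_calculate_constellation_frequencies (data : List (List Int)) (out : List Int) : Prop := out = calculate_constellation_frequencies_alt data
instance (data : List (List Int)) (out : List Int) : Decidable (Spec_calculate_constellation_frequencies data out) := by unfold Spec_calculate_constellation_frequencies; infer_instance

-- ===== CLAIM (what is proved, stated in full; the proofs are below) =====
def Claim_equal_calculate_constellation_frequencies : Prop := ∀ (data : List (List Int)), Dom_calculate_constellation_frequencies data → Spec_calculate_constellation_frequencies data (calculate_constellation_frequencies data)

-- ===== LEMMAS AND PROOFS =====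

-- B's key of a row, as named in the proofs
def pvKey (row : List Int) : String :=
  PySem.Str.join "" (row.map (fun a => PySem.Int.toStr a ++ "-"))

-- A's loop body, as named in the proofs (definitionally the lambda in the port)
def pvStepA (st : PySem.Dict String Int × List String) (row : List Int) :
    PySem.Dict String Int × List String :=
  let constellation := row.foldl
    (fun c attr => c ++ (PySem.Int.toStr attr ++ "-")) ""
  let constellation_data := st.2 ++ [constellation]
  let constellations :=
    if st.1.contains constellation then st.1 else st.1.insert constellation 0
  (constellations.insert constellation (constellations.getD constellation 0 + 1),
   constellation_data)

theorem pvJoin_nil_flatten (cs : List (List Char)) :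
    PySem.Chars.join [] cs = cs.flatten := by
  induction cs with
  | nil => simp [PySem.Chars.join, List.intercalate]
  | cons c cs ih => cases cs <;> simp_all [PySem.Chars.join, List.intercalate, List.intersperse]

-- A's inner string-building loop computes B's key
theorem pvKey_fold (row : List Int) (s : String) :
    row.foldl (fun c attr => c ++ (PySem.Int.toStr attr ++ "-")) s
      = s ++ pvKey row := by
  induction row generalizing s with
  | nil =>
      apply String.toList_inj.mp
      simp [pvKey, PySem.Str.join]
  | cons a row ih =>
      simp only [List.foldl_cons, ih]
      apply String.toList_inj.mp
      simp [pvKey, PySem.Str.join, pvJoin_nil_flatten]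

-- the dict update of one iteration, seen through getD
theorem pvDict_step (d : PySem.Dict String Int) (c k : String) :
    ((if d.contains c then d else d.insert c 0).insert c
        ((if d.contains c then d else d.insert c 0).getD c 0 + 1)).getD k 0
      = if k = c then d.getD k 0 + 1 else d.getD k 0 := by
  by_cases h : d.contains c = true
  · simp only [h, if_true, PySem.Dict.getD_insert]
    split_ifs with hk
    · subst hk; rfl
    · rfl
  · have h' : d.contains c = false := by simpa using h
    simp only [h', Bool.false_eq_true, if_false, PySem.Dict.getD_insert]
    rw [PySem.Dict.getD_of_not_contains d _ h']
    split_ifs with hk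
    · subst hk; rw [PySem.Dict.getD_of_not_contains d _ h']
    · rfl

-- invariant of A's main loop: keys accumulate as map pvKey, the dict counts occurrences
theorem pvLoopA (l : List (List Int)) (d : PySem.Dict String Int) (acc : List String) :
    (l.foldl pvStepA (d, acc)).2 = acc ++ l.map pvKey
    ∧ ∀ k, (l.foldl pvStepA (d, acc)).1.getD k 0
        = d.getD k 0 + ((l.map pvKey).count k : Int) := by
  induction l generalizing d acc with
  | nil => simp
  | cons row l ih =>
      simp only [List.foldl_cons, List.map_cons]
      have hstep : pvStepA (d, acc) row =
          ((if d.contains (pvKey row) then d else d.insert (pvKey row) 0).insert (pvKey row)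
            ((if d.contains (pvKey row) then d
              else d.insert (pvKey row) 0).getD (pvKey row) 0 + 1),
           acc ++ [pvKey row]) := by
        simp [pvStepA, pvKey_fold]
      rw [hstep]
      obtain ⟨h2, h1⟩ := ih _ (acc ++ [pvKey row])
      refine ⟨by rw [h2]; simp, fun k => ?_⟩
      rw [h1 k, pvDict_step, List.count_cons]
      by_cases hk : k = pvKey row
      · subst hk
        simp only [BEq.rfl, if_true]
        push_cast
        ring
      · have hb : (pvKey row == k) = false := by
          rw [beq_eq_false_iff_ne]
          exact fun h => hk h.symm
        simp [if_neg hk, hb]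

-- range-indexing over the key list is just mapping over it
theorem pvIndex_map (keys : List String) (d : PySem.Dict String Int) :
    (PySem.List.pyRange 0 (keys.length : Int) 1).map
      (fun i => d.getD (PySem.List.pyGetD keys i "") 0)
      = keys.map (fun k => d.getD k 0) := by
  have h : (fun i => d.getD (PySem.List.pyGetD keys i "") 0)
      = (fun k => d.getD k 0) ∘ (fun i => PySem.List.pyGetD keys i "") := rfl
  rw [h, ← List.map_map]
  rw [PySem.List.map_pyGetD_pyRange_zero' keys ""]

-- A computes, per row, the count of its key in the whole key list
theorem pvA_eq (data : List (List Int)) :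
    calculate_constellation_frequencies data
      = (data.map pvKey).map (fun k => ((data.map pvKey).count k : Int)) := by
  unfold calculate_constellation_frequencies
  simp only []
  obtain ⟨h2, h1⟩ := pvLoopA data PySem.Dict.empty []
  show (PySem.List.pyRange 0 (data.length : Int) 1).map
      (fun i => ((data.foldl pvStepA (PySem.Dict.empty, [])).1).getD
        (PySem.List.pyGetD (data.foldl pvStepA (PySem.Dict.empty, [])).2 i "") 0) = _
  rw [h2]
  simp only [List.nil_append]
  have hlen : ((data.map pvKey).length : Int) = (data.length : Int) := by simp
  rw [← hlen, pvIndex_map]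
  apply List.map_congr_left
  intro k _
  rw [h1 k]
  simp [PySem.Dict.getD_empty]

-- a key after the dropped run is never the run's key (keys are sorted, the run is maximal)
theorem pvDrop_ne (k : String) (rest : List (String × Int))
    (hp : rest.Pairwise (fun a b => a.1 ≤ b.1)) (hb : ∀ p ∈ rest, k ≤ p.1) :
    ∀ p ∈ rest.dropWhile (fun p => p.1 == k), p.1 ≠ k := by
  induction rest with
  | nil => simp
  | cons q rest ih =>
      rcases List.pairwise_cons.mp hp with ⟨hq, hp'⟩
      by_cases h : (q.1 == k) = true
      · rw [List.dropWhile_cons, if_pos h]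
        exact ih hp' (fun p hpm => hb p (List.mem_cons_of_mem _ hpm))
      · rw [List.dropWhile_cons, if_neg h]
        intro p hpm
        rcases List.mem_cons.mp hpm with rfl | hpm2
        · exact fun he => h (by simp [he])
        · have h1 : k < q.1 :=
            lt_of_le_of_ne (hb q List.mem_cons_self) (fun he => h (by simp [he.symm]))
          have h2 : q.1 ≤ p.1 := hq p hpm2
          intro he
          rw [he] at h2
          exact absurd h2 (not_le.mpr h1)

-- the sweep over a key-sorted pair list writes, at each stored index, the count of that
-- pair's key among all the pairs' keys
theorem pvSweep_eq (n : Nat) : ∀ (pairs : List (String × Int)), pairs.length ≤ n →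
    ∀ (result : List Int), pairs.Pairwise (fun a b => a.1 ≤ b.1) →
    pvSweep pairs result
      = pairs.foldl
          (fun r p => PySem.List.pySetD r p.2 (((pairs.map Prod.fst).count p.1 : Nat) : Int))
          result := by
  induction n with
  | zero =>
      intro pairs h result _
      have hnil : pairs = [] := List.eq_nil_of_length_eq_zero (Nat.le_zero.mp h)
      subst hnil
      simp [pvSweep]
  | succ n ih =>
      intro pairs hlen result hp
      match pairs with
      | [] => simp [pvSweep]
      | (k, i) :: rest =>
        rcases List.pairwise_cons.mp hp with ⟨hk, hrp⟩
        have hrest : rest.takeWhile (fun p => p.1 == k) ++ rest.dropWhile (fun p => p.1 == k) = rest :=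
          List.takeWhile_append_dropWhile
        set t := rest.takeWhile (fun p => p.1 == k) with ht
        set dd := rest.dropWhile (fun p => p.1 == k) with hd
        have ht_eq : ∀ q ∈ t, q.1 = k := by
          intro q hq
          have := List.mem_takeWhile_imp hq
          simpa using this
        have hd_ne : ∀ q ∈ dd, q.1 ≠ k := pvDrop_ne k rest hrp (fun p hpm => hk p hpm)
        have hd_pair : dd.Pairwise (fun a b => a.1 ≤ b.1) :=
          hrp.sublist (List.dropWhile_sublist _)
        have hd_len : dd.length ≤ n := by
          have h1 := List.length_dropWhile_le (fun p => p.1 == k) rest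
          rw [← hd] at h1
          have h2 : rest.length + 1 ≤ n + 1 := by simpa using hlen
          omega
        have hcount_t : (t.map Prod.fst).count k = t.length := by
          have h1 : (t.map Prod.fst).count k = (t.map Prod.fst).length := by
            rw [List.count_eq_length]
            intro b hb
            rcases List.mem_map.mp hb with ⟨q, hq, rfl⟩
            exact (ht_eq q hq).symm
          simpa using h1
        have hcount_d0 : (dd.map Prod.fst).count k = 0 := by
          rw [List.count_eq_zero]
          intro hmem
          rcases List.mem_map.mp hmem with ⟨q, hq, hqk⟩
          exact hd_ne q hq hqk
        have hcount_k : ((((k, i) :: rest).map Prod.fst).count k) = t.length + 1 := by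
          rw [← hrest]
          simp [List.count_append, hcount_t, hcount_d0]
        have hcount_p : ∀ q ∈ dd,
            (((k, i) :: rest).map Prod.fst).count q.1 = (dd.map Prod.fst).count q.1 := by
          intro q hq
          rw [← hrest]
          have h1 : (t.map Prod.fst).count q.1 = 0 := by
            rw [List.count_eq_zero]
            intro hmem
            rcases List.mem_map.mp hmem with ⟨q', hq', hqq⟩
            exact hd_ne q hq (hqq ▸ (ht_eq q' hq'))
          have hqk : (k == q.1) = false := by
            rw [beq_eq_false_iff_ne]
            exact fun he => hd_ne q hq he.symm
          simp [List.count_cons, List.count_append, hqk, h1]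
        -- one unfolding step of pvSweep
        rw [pvSweep]
        simp only [← ht, ← hd]
        rw [ih dd hd_len _ hd_pair]
        set c1 : Int := ((((k, i) :: t).length : Nat) : Int) with hc1
        have hG : List.foldl
              (fun r p => PySem.List.pySetD r p.2
                ((List.count p.1 (((k, i) :: rest).map Prod.fst) : Nat) : Int)) result ((k, i) :: rest)
            = List.foldl
              (fun r p => PySem.List.pySetD r p.2
                (if p.1 == k then c1 else ((List.count p.1 (dd.map Prod.fst) : Nat) : Int)))
              result ((k, i) :: rest) := by
          apply PySem.List.foldl_congr_mem
          intro acc q hq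
          by_cases hqk : (q.1 == k) = true
          · have hq1 : q.1 = k := beq_iff_eq.mp hqk
            rw [if_pos hqk, hq1, hcount_k, hc1]
            simp
          · rw [if_neg hqk]
            have hqmem : q ∈ dd := by
              rcases List.mem_cons.mp hq with rfl | hq2
              · simp at hqk
              · rw [← hrest] at hq2
                rcases List.mem_append.mp hq2 with hmem | hmem
                · exact absurd (ht_eq q hmem) (by simpa using hqk)
                · exact hmem
            rw [hcount_p q hqmem]
        rw [hG]
        conv_rhs => rw [← hrest, ← List.cons_append]
        rw [List.foldl_append]
        have hrun : List.foldl
              (fun r p => PySem.List.pySetD r p.2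
                (if p.1 == k then c1 else ((List.count p.1 (dd.map Prod.fst) : Nat) : Int)))
              result ((k, i) :: t)
            = List.foldl (fun r p => PySem.List.pySetD r p.2 c1) result ((k, i) :: t) := by
          apply PySem.List.foldl_congr_mem
          intro acc q hq
          have hq1 : q.1 = k := by
            rcases List.mem_cons.mp hq with rfl | hqt
            · rfl
            · exact ht_eq q hqt
          rw [if_pos (beq_iff_eq.mpr hq1)]
        rw [hrun]
        exact (PySem.List.foldl_congr_mem dd _ _ _
          (fun acc q hq => by rw [if_neg (by simpa using hd_ne q hq)])).symm

-- distinct-index writes: the fold of pySetD's, read back pointwise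
theorem pvWrites (f : String → Int) : ∀ (L : List (String × Int)) (init : List Int),
    (L.map Prod.snd).Nodup → (∀ p ∈ L, 0 ≤ p.2) → ∀ j : Nat,
    (L.foldl (fun r p => PySem.List.pySetD r p.2 (f p.1)) init)[j]?
      = match L.find? (fun p => p.2 == (j : Int)) with
        | some p => if j < init.length then some (f p.1) else none
        | none => init[j]? := by
  intro L
  induction L with
  | nil => intro init _ _ j; simp
  | cons q L ih =>
      intro init hnd hnn j
      have hq0 : 0 ≤ q.2 := hnn q List.mem_cons_self
      have hset : PySem.List.pySetD init q.2 (f q.1) = init.set q.2.toNat (f q.1) :=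
        PySem.List.pySetD_of_nonneg init (f q.1) hq0
      rw [List.map_cons] at hnd
      rcases List.nodup_cons.mp hnd with ⟨hq_not, hnd'⟩
      by_cases hqj : (q.2 == (j : Int)) = true
      · have hq2 : q.2 = (j : Int) := beq_iff_eq.mp hqj
        have hq2n : q.2.toNat = j := by omega
        have hfind : L.find? (fun p => p.2 == (j : Int)) = none := by
          rw [List.find?_eq_none]
          intro p hpm hpj
          have hp2 : p.2 = (j : Int) := beq_iff_eq.mp hpj
          exact hq_not (by
            rw [hq2, ← hp2]
            exact List.mem_map.mpr ⟨p, hpm, rfl⟩)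
        rw [List.foldl_cons, List.find?_cons_of_pos (l := L) (a := q) (by simpa using hqj),
          ih _ hnd' (fun p hpm => hnn p (List.mem_cons_of_mem _ hpm)) j, hfind]
        rw [hset, hq2n]
        simp [List.getElem?_set]
      · rw [List.foldl_cons, List.find?_cons_of_neg (l := L) (a := q) (by simpa using hqj),
          ih _ hnd' (fun p hpm => hnn p (List.mem_cons_of_mem _ hpm)) j]
        have hq2n : q.2.toNat ≠ j := by
          intro he
          exact hqj (beq_iff_eq.mpr (by omega))
        rcases hfind : L.find? (fun p => p.2 == (j : Int)) with _ | p
        · simp only [hfind]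
          rw [hset, List.getElem?_set, if_neg hq2n]
        · simp only [hfind]
          rw [hset, List.length_set]

-- B computes, per row, the count of its key in the whole key list
theorem pvB_eq (data : List (List Int)) :
    calculate_constellation_frequencies_alt data
      = (data.map pvKey).map (fun k => ((data.map pvKey).count k : Int)) := by
  unfold calculate_constellation_frequencies_alt
  simp only []
  set keys := data.map pvKey with hkeys
  have hkey_fun : (fun row => PySem.Str.join "" (List.map (fun a => PySem.Int.toStr a ++ "-") row)) = pvKey := rfl
  rw [hkey_fun]
  set rng := PySem.List.pyRange 0 (keys.length : Int) 1 with hrng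
  have hrlen : rng.length = keys.length := by
    rw [hrng, PySem.List.length_pyRange_one]; omega
  set Z := keys.zip rng with hZ
  set L := PySem.List.sorted Z Prod.fst false with hL
  have hperm : L.Perm Z := PySem.List.sorted_perm Z Prod.fst false
  have hpair : L.Pairwise (fun a b => a.1 ≤ b.1) := PySem.List.sorted_pairwise Z Prod.fst
  have hsnd : (L.map Prod.snd).Perm rng := by
    have := hperm.map Prod.snd
    rwa [List.map_snd_zip (by omega)] at this
  have hnd : (L.map Prod.snd).Nodup :=
    (hsnd.nodup_iff).mpr (PySem.List.nodup_pyRange_one 0 (keys.length : Int))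
  have hnn : ∀ p ∈ L, 0 ≤ p.2 := by
    intro p hpm
    have hpz : p ∈ Z := hperm.mem_iff.mp hpm
    have h2 : p.2 ∈ rng := (List.of_mem_zip hpz).2
    rw [hrng] at h2
    exact (PySem.List.mem_pyRange_one.mp h2).1
  have hfst_count : ∀ k, (L.map Prod.fst).count k = keys.count k := by
    intro k
    have hm := hperm.map Prod.fst
    rw [List.map_fst_zip (by omega)] at hm
    exact hm.count_eq k
  rw [pvSweep_eq L.length L (le_refl _) _ hpair]
  rw [PySem.List.foldl_congr_mem L _
    (fun r p => PySem.List.pySetD r p.2 ((keys.count p.1 : Nat) : Int)) _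
    (by intro acc q _; rw [hfst_count q.1])]
  apply List.ext_getElem?
  intro j
  rw [pvWrites (fun s => ((List.count s keys : Nat) : Int)) L _ hnd hnn j]
  by_cases hj : j < keys.length
  · have hjz : j < Z.length := by
      rw [hZ, List.length_zip, hrlen]; omega
    have hjr : j < rng.length := by omega
    have hr : rng[j]'hjr = (j : Int) := by
      simp [hrng]
    have hmem : (keys[j]'hj, (j : Int)) ∈ Z := by
      have hze : Z[j]'hjz = (keys[j]'hj, (j : Int)) := by
        have h0 : Z[j]'hjz = (keys[j]'hj, rng[j]'hjr) := List.getElem_zip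
        rw [h0, hr]
      exact List.mem_iff_getElem.mpr ⟨j, hjz, hze⟩
    rcases hfind : L.find? (fun p => p.2 == (j : Int)) with _ | p
    · exfalso
      rw [List.find?_eq_none] at hfind
      exact hfind (keys[j]'hj, (j : Int)) (hperm.mem_iff.mpr hmem) (by simp)
    · simp only [hfind]
      have hp2 : p.2 = (j : Int) :=
        beq_iff_eq.mp (List.find?_some (p := fun q => q.2 == (j : Int)) (a := p) hfind)
      have hpz : p ∈ Z :=
        hperm.mem_iff.mp
          (List.mem_of_find?_eq_some (p := fun q => q.2 == (j : Int)) (a := p) hfind)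
      have hp1 : p.1 = keys[j]'hj := by
        rcases List.mem_iff_getElem.mp hpz with ⟨m, hm, he⟩
        have hmk : m < keys.length := by
          rw [hZ, List.length_zip, hrlen] at hm
          omega
        have hmr : m < rng.length := by omega
        have h0 : Z[m]'hm = (keys[m]'hmk, rng[m]'hmr) := List.getElem_zip
        have hrm : rng[m]'hmr = (m : Int) := by
          simp [hrng]
        rw [h0, hrm] at he
        have hmj : m = j := by
          have h2 : p.2 = (m : Int) := by rw [← he]
          omega
        subst hmj
        rw [← he]
      rw [hp1]
      have hjd : j < data.length := by simpa [hkeys] using hj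
      rw [if_pos (by simpa using hjd), List.getElem?_map, List.getElem?_eq_getElem hj]
      simp
  · have hle : keys.length ≤ j := Nat.le_of_not_lt hj
    rcases hfind : L.find? (fun p => p.2 == (j : Int)) with _ | p
    · simp only [hfind]
      rw [List.getElem?_eq_none (by simpa [hkeys] using hle),
        List.getElem?_eq_none (by simpa using hle)]
    · simp only [hfind]
      rw [if_neg (by simpa [hkeys] using hj)]
      symm
      exact List.getElem?_eq_none (by simpa using hle)

-- ===== VERDICT (by name: the statement is the Claim_ definition above) =====
theorem calculate_constellation_frequencies_spec : Claim_equal_calculate_constellation_frequencies := by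
  intro data _
  unfold Spec_calculate_constellation_frequencies
  rw [pvA_eq, pvB_eq]
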